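-- pv_equiv track=rewrite | github.com/ayoubzulfiqar/Leeteration | AllValidTripletsThatCanRepresentaCountry/all_valid_triplets_that_can_represent_a_country.py | find_valid_triplets_for_country
-- ===== SOURCE A (Python) =====
-- import math
--
-- def is_prime(n):
--     if n < 2:
--         return False
--     for i in range(2, int(math.sqrt(n)) + 1):
--         if n % i == 0:
--             return False
--     return True
--
-- def find_valid_triplets_for_country(nums):
--     n = len(nums)
--     if n < 3:
--         return []
--
--     nums.sort()
--
--     valid_triplets = []
--
--     for i in range(n - 2):
--         if i > 0 and nums[i] == nums[i-1]:
--             continue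
--
--         for j in range(i + 1, n - 1):
--             if j > i + 1 and nums[j] == nums[j-1]:
--                 continue
--
--             for k in range(j + 1, n):
--                 if k > j + 1 and nums[k] == nums[k-1]:
--                     continue
--
--                 current_sum = nums[i] + nums[j] + nums[k]
--
--                 if is_prime(current_sum):
--                     valid_triplets.append([nums[i], nums[j], nums[k]])
--
--     return valid_triplets
-- ===== SOURCE B (Python) =====
-- import math
--
-- def is_prime(n):
--     if n < 2:
--         return False
--     for i in range(2, int(math.sqrt(n)) + 1):
--         if n % i == 0:
--             return False
--     return True
--
-- def find_valid_triplets_for_country(nums):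
--     if len(nums) < 3:
--         return []
--     nums.sort()
--     n = len(nums)
--     uniq = dict.fromkeys(
--         (nums[i], nums[j], nums[k])
--         for i in range(n)
--         for j in range(i + 1, n)
--         for k in range(j + 1, n)
--     )
--     return [list(t) for t in uniq if is_prime(sum(t))]
-- ===== Notes on version B (the rewrite author's own statement) =====
-- stated objective: simpler
-- what changed: B replaces A's three hand-written duplicate-skip branches by enumerating all index triples of the sorted list in one comprehension, deduplicating them with dict.fromkeys (first occurrence keeps A's order) and filtering for a prime sum afterwards.
import Mathlib
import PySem

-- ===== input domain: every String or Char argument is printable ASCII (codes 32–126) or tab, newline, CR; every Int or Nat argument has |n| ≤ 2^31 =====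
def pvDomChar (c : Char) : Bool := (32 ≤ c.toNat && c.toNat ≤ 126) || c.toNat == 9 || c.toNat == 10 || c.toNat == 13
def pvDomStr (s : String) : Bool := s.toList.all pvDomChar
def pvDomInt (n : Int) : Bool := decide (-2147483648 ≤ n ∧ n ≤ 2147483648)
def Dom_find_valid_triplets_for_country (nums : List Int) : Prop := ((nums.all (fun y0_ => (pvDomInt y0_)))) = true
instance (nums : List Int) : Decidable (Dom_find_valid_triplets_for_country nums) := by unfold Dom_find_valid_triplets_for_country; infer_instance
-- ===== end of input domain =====

-- B replaces A's three hand-written duplicate-skip branches by enumerating all index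
-- triples of the sorted list, deduplicating them with dict.fromkeys (first occurrence)
-- and filtering for a prime sum afterwards; objective: simpler (not faster).  Both A and B
-- sort `nums` in place (same observable mutation); the theorem is about the return value.

-- ===== PORT A =====

-- helper is_prime (identical in A and B): int(math.sqrt(n)) is exact (= Nat.sqrt) on the
-- task's domain (|n| ≤ 3·2^31 < 2^52, doubles are exact there)
def ip_go (n : Int) : List Int → Bool
  | [] => true
  | i :: is => if PySem.Int.mod n i = 0 then false else ip_go n is

def is_prime (n : Int) : Bool :=
  if n < 2 then false
  else ip_go n (PySem.List.pyRange 2 ((Nat.sqrt n.toNat : Int) + 1))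

def find_valid_triplets_for_country (nums : List Int) : List (List Int) :=
  let n : Int := PySem.List.len nums
  if n < 3 then []
  else
    let s := PySem.List.sorted nums (fun x => x)
    (PySem.List.pyRange 0 (n - 2)).foldl (fun acc1 i =>
      if i > 0 ∧ PySem.List.pyGetD s i 0 = PySem.List.pyGetD s (i - 1) 0 then acc1
      else
        (PySem.List.pyRange (i + 1) (n - 1)).foldl (fun acc2 j =>
          if j > i + 1 ∧ PySem.List.pyGetD s j 0 = PySem.List.pyGetD s (j - 1) 0 then acc2
          else
            (PySem.List.pyRange (j + 1) n).foldl (fun acc3 k =>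
              if k > j + 1 ∧ PySem.List.pyGetD s k 0 = PySem.List.pyGetD s (k - 1) 0 then acc3
              else
                let current_sum := PySem.List.pyGetD s i 0 + PySem.List.pyGetD s j 0 + PySem.List.pyGetD s k 0
                if is_prime current_sum then
                  acc3 ++ [[PySem.List.pyGetD s i 0, PySem.List.pyGetD s j 0, PySem.List.pyGetD s k 0]]
                else acc3) acc2) acc1) []

-- ===== PORT B =====
def find_valid_triplets_for_country_alt (nums : List Int) : List (List Int) :=
  if PySem.List.len nums < 3 then []
  else
    let s := PySem.List.sorted nums (fun x => x)
    let n : Int := PySem.List.len s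
    let uniq := PySem.List.dedup ((PySem.List.pyRange 0 n).flatMap (fun i =>
      (PySem.List.pyRange (i + 1) n).flatMap (fun j =>
        (PySem.List.pyRange (j + 1) n).map (fun k =>
          (PySem.List.pyGetD s i 0, PySem.List.pyGetD s j 0, PySem.List.pyGetD s k 0)))))
    uniq.filterMap (fun t =>
      if is_prime (t.1 + t.2.1 + t.2.2) then some [t.1, t.2.1, t.2.2] else none)

-- ===== PRECONDITION & SPEC =====
def Spec_find_valid_triplets_for_country (nums : List Int) (out : List (List Int)) : Prop := out = find_valid_triplets_for_country_alt nums
instance (nums : List Int) (out : List (List Int)) : Decidable (Spec_find_valid_triplets_for_country nums out) := by unfold Spec_find_valid_triplets_for_country; infer_instance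

-- ===== CLAIM (what is proved, stated in full; the proofs are below) =====
def Claim_equal_find_valid_triplets_for_country : Prop := ∀ (nums : List Int), Dom_find_valid_triplets_for_country nums → Spec_find_valid_triplets_for_country nums (find_valid_triplets_for_country nums)

-- ===== LEMMAS AND PROOFS =====

-- the shape of one of A's skip-loops: process an element unless it equals its predecessor
def sGo {β : Type} (g : Int → List Int → List β) : Option Int → List Int → List β
  | _, [] => []
  | prev, x :: xs => (if prev = some x then [] else g x xs) ++ sGo g (some x) xs

-- index-pairs / index-triples of a list, by value, in B's enumeration order
def combos2T : List Int → List (Int × Int)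
  | [] => []
  | x :: xs => xs.map (fun z => (x, z)) ++ combos2T xs

def combos3T : List Int → List (Int × Int × Int)
  | [] => []
  | x :: xs => (combos2T xs).map (fun p => (x, p.1, p.2)) ++ combos3T xs

-- A's three skip-loop levels with the prime filter stripped
def pvA1 (u : List Int) : List Int := sGo (fun z _ => [z]) none u
def pvA2 (u : List Int) : List (Int × Int) := sGo (fun y ys => (pvA1 ys).map (fun z => (y, z))) none u
def pvA3 (u : List Int) : List (Int × Int × Int) := sGo (fun x xs => (pvA2 xs).map (fun p => (x, p.1, p.2))) none u

def pe3 (t : Int × Int × Int) : Option (List Int) :=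
  if is_prime (t.1 + t.2.1 + t.2.2) then some [t.1, t.2.1, t.2.2] else none

def g1A (x : Int) (r : List Int) : List (List Int) :=
  sGo (fun y ys => sGo (fun z _ => if is_prime (x + y + z) then [[x, y, z]] else []) none ys) none r

-- generic sGo lemmas
theorem sGo_congr {β : Type} (g g' : Int → List Int → List β)
    (h : ∀ x r, g x r = g' x r) : ∀ (p : Option Int) (u : List Int), sGo g p u = sGo g' p u := by
  intro p u
  induction u generalizing p with
  | nil => rfl
  | cons x xs ih => simp only [sGo, h, ih]

theorem sGo_filterMap {β γ : Type} (g : Int → List Int → List β) (f : β → Option γ) :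
    ∀ (p : Option Int) (u : List Int),
      (sGo g p u).filterMap f = sGo (fun x r => (g x r).filterMap f) p u := by
  intro p u
  induction u generalizing p with
  | nil => rfl
  | cons x xs ih =>
    simp only [sGo, List.filterMap_append, ih]
    by_cases hp : p = some x <;> simp [hp]

theorem sGo_heads {β : Type} (g : Int → List Int → List β) (h : β → Int)
    (hg : ∀ x r c, c ∈ g x r → h c = x) :
    ∀ (u : List Int) (p : Option Int) (c : β), c ∈ sGo g p u → ∃ x' ∈ u, h c = x' := by
  intro u
  induction u with
  | nil => intro p c hc; simp [sGo] at hc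
  | cons x xs ih =>
    intro p c hc
    simp only [sGo, List.mem_append] at hc
    rcases hc with hc | hc
    · by_cases hp : p = some x
      · simp [hp] at hc
      · simp only [if_neg hp] at hc
        exact ⟨x, List.mem_cons_self, hg x xs c hc⟩
    · obtain ⟨x', hx', he⟩ := ih (some x) c hc
      exact ⟨x', List.mem_cons_of_mem _ hx', he⟩

theorem sGo_ne_of_le {β : Type} (g : Int → List Int → List β) (h : β → Int)
    (hg : ∀ x r c, c ∈ g x r → h c = x) :
    ∀ (u : List Int) (p : Int), u.Pairwise (· ≤ ·) → (∀ y ∈ u, p ≤ y) →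
      ∀ c ∈ sGo g (some p) u, h c ≠ p := by
  intro u
  induction u with
  | nil => intro p _ _ c hc; simp [sGo] at hc
  | cons x xs ih =>
    intro p hpw hlow c hc
    simp only [sGo, List.mem_append] at hc
    have hpx : p ≤ x := hlow x List.mem_cons_self
    rcases hc with hc | hc
    · by_cases hp : (some p : Option Int) = some x
      · simp [hp] at hc
      · simp only [if_neg hp] at hc
        have : h c = x := hg x xs c hc
        intro hcp; apply hp; rw [← this, hcp]
    · by_cases hp : x = p
      · subst hp
        exact ih x (List.Pairwise.of_cons hpw) (fun y hy => (List.pairwise_cons.mp hpw).1 y hy) c hc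
      · obtain ⟨x', hx', he⟩ := sGo_heads g h hg xs (some x) c hc
        have hxx' : x ≤ x' := (List.pairwise_cons.mp hpw).1 x' hx'
        intro hcp; rw [he] at hcp; omega

theorem sGo_some_eq_filter {β : Type} (g : Int → List Int → List β) (h : β → Int)
    (hg : ∀ x r c, c ∈ g x r → h c = x) :
    ∀ (u : List Int) (p : Int), u.Pairwise (· ≤ ·) → (∀ y ∈ u, p ≤ y) →
      sGo g (some p) u = (sGo g none u).filter (fun c => !decide (h c = p)) := by
  intro u p hpw hlow
  cases u with
  | nil => rfl
  | cons x xs =>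
    have hpx : p ≤ x := hlow x List.mem_cons_self
    have hxw : xs.Pairwise (· ≤ ·) := List.Pairwise.of_cons hpw
    have hxlow : ∀ y ∈ xs, x ≤ y := fun y hy => (List.pairwise_cons.mp hpw).1 y hy
    by_cases hp : x = p
    · subst hp
      have h1 : sGo g (some x) (x :: xs) = sGo g (some x) xs := by
        simp [sGo]
      have h2 : (sGo g none (x :: xs)) = g x xs ++ sGo g (some x) xs := by
        simp [sGo]
      rw [h1, h2, List.filter_append]
      have h3 : (g x xs).filter (fun c => !decide (h c = x)) = [] := by
        rw [List.filter_eq_nil_iff]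
        intro c hc
        simp [hg x xs c hc]
      have h4 : (sGo g (some x) xs).filter (fun c => !decide (h c = x)) = sGo g (some x) xs := by
        rw [List.filter_eq_self]
        intro c hc
        simp [sGo_ne_of_le g h hg xs x hxw hxlow c hc]
      rw [h3, h4, List.nil_append]
    · have hplt : p < x := lt_of_le_of_ne hpx (fun hh => hp hh.symm)
      have h1 : sGo g (some p) (x :: xs) = g x xs ++ sGo g (some x) xs := by
        simp only [sGo]
        have : ¬ ((some p : Option Int) = some x) := by simp; omega
        rw [if_neg this]
      have h2 : (sGo g none (x :: xs)) = g x xs ++ sGo g (some x) xs := by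
        simp [sGo]
      rw [h1, h2, List.filter_append]
      have h3 : (g x xs).filter (fun c => !decide (h c = p)) = g x xs := by
        rw [List.filter_eq_self]
        intro c hc
        have : h c = x := hg x xs c hc
        simp [this]; omega
      have h4 : (sGo g (some x) xs).filter (fun c => !decide (h c = p)) = sGo g (some x) xs := by
        rw [List.filter_eq_self]
        intro c hc
        obtain ⟨x', hx', he⟩ := sGo_heads g h hg xs (some x) c hc
        have : x ≤ x' := hxlow x' hx'
        simp [he]; omega
      rw [h3, h4]

-- dict.fromkeys-style dedup of an append / of a cons / of an injective map
theorem dedup_append {α : Type} [BEq α] [LawfulBEq α] [DecidableEq α] (L1 L2 : List α) :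
    PySem.List.dedup (L1 ++ L2)
      = PySem.List.dedup L1 ++ (PySem.List.dedup L2).filter (fun y => !decide (y ∈ L1)) := by
  simp only [PySem.List.dedup_eq_ofList, PySem.Set.ofList_append,
    PySem.Set.update_eq_append_filter]
  congr 1
  apply List.filter_congr
  intro y hy
  congr 1
  rw [Bool.eq_iff_iff, PySem.Set.contains_iff, decide_eq_true_eq, PySem.Set.mem_ofList]

theorem dedup_cons {α : Type} [BEq α] [LawfulBEq α] [DecidableEq α] (x : α) (L : List α) :
    PySem.List.dedup (x :: L) = x :: (PySem.List.dedup L).filter (fun y => !decide (y = x)) := by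
  have h1 : PySem.List.dedup [x] = [x] := by
    rw [PySem.List.dedup_eq_ofList]
    exact PySem.Set.ofList_eq_self_of_nodup _ (List.nodup_singleton x)
  have := dedup_append [x] L
  simp only [List.singleton_append] at this
  rw [this, h1, List.singleton_append]
  congr 1
  apply List.filter_congr
  intro y _
  simp

theorem dedup_map_inj {α β : Type} [BEq α] [LawfulBEq α] [DecidableEq α] [BEq β] [LawfulBEq β] [DecidableEq β] (f : α → β)
    (hf : Function.Injective f) (L : List α) :
    PySem.List.dedup (L.map f) = (PySem.List.dedup L).map f := by
  induction L with
  | nil => rfl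
  | cons a L ih =>
    rw [List.map_cons, dedup_cons, dedup_cons, ih, List.map_cons, List.filter_map]
    congr 1
    congr 1
    apply List.filter_congr
    intro y _
    simp only [Function.comp_apply]
    congr 1
    rw [decide_eq_decide]
    exact ⟨fun hh => hf hh, fun hh => by rw [hh]⟩

-- membership facts about combos2T / combos3T
theorem snd_mem_combos2T (u : List Int) (p : Int × Int) (hp : p ∈ combos2T u) : p.2 ∈ u := by
  induction u with
  | nil => simp [combos2T] at hp
  | cons x xs ih =>
    simp only [combos2T, List.mem_append, List.mem_map] at hp
    rcases hp with ⟨z, hz, rfl⟩ | hp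
    · exact List.mem_cons_of_mem _ hz
    · exact List.mem_cons_of_mem _ (ih hp)

theorem tail_mem_combos3T (u : List Int) (t : Int × Int × Int) (ht : t ∈ combos3T u) :
    (t.2.1, t.2.2) ∈ combos2T u := by
  induction u with
  | nil => simp [combos3T] at ht
  | cons x xs ih =>
    simp only [combos3T, List.mem_append, List.mem_map] at ht
    simp only [combos2T, List.mem_append]
    rcases ht with ⟨p, hp, rfl⟩ | ht
    · exact Or.inr hp
    · exact Or.inr (by
        have := ih ht
        simpa using this)

-- the three levels: A's skip-loops produce exactly the first-occurrence dedup
theorem pvA1_eq (u : List Int) (hu : u.Pairwise (· ≤ ·)) : pvA1 u = PySem.List.dedup u := by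
  induction u with
  | nil => rfl
  | cons x xs ih =>
    have hxw : xs.Pairwise (· ≤ ·) := List.Pairwise.of_cons hu
    have hxlow : ∀ y ∈ xs, x ≤ y := (List.pairwise_cons.mp hu).1
    have hg : ∀ (a : Int) (r : List Int) (c : Int), c ∈ (fun z (_ : List Int) => [z]) a r → (fun z => z) c = a := by
      intro a r c hc; simpa using hc
    have h1 : pvA1 (x :: xs) = x :: sGo (fun z _ => [z]) (some x) xs := by
      simp [pvA1, sGo]
    rw [h1, sGo_some_eq_filter (fun z _ => [z]) (fun z => z) hg xs x hxw hxlow, dedup_cons]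
    have h2 : sGo (fun z (_ : List Int) => [z]) none xs = PySem.List.dedup xs := ih hxw
    rw [h2]

theorem pvA2_eq (u : List Int) (hu : u.Pairwise (· ≤ ·)) :
    pvA2 u = PySem.List.dedup (combos2T u) := by
  induction u with
  | nil => rfl
  | cons y ys ih =>
    have hxw : ys.Pairwise (· ≤ ·) := List.Pairwise.of_cons hu
    have hxlow : ∀ z ∈ ys, y ≤ z := (List.pairwise_cons.mp hu).1
    have hg : ∀ (a : Int) (r : List Int) (c : Int × Int),
        c ∈ (fun y ys => (pvA1 ys).map (fun z => (y, z))) a r → (fun p => p.1) c = a := by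
      intro a r c hc
      simp only [List.mem_map] at hc
      obtain ⟨z, _, rfl⟩ := hc; rfl
    have h1 : pvA2 (y :: ys)
        = (pvA1 ys).map (fun z => (y, z)) ++ sGo (fun y ys => (pvA1 ys).map (fun z => (y, z))) (some y) ys := by
      simp [pvA2, sGo]
    rw [h1, sGo_some_eq_filter _ (fun p => p.1) hg ys y hxw hxlow]
    have h2 : sGo (fun y ys => (pvA1 ys).map (fun z => (y, z))) none ys = PySem.List.dedup (combos2T ys) := ih hxw
    rw [h2, pvA1_eq ys hxw]
    show _ = PySem.List.dedup (ys.map (fun z => (y, z)) ++ combos2T ys)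
    rw [dedup_append, dedup_map_inj (fun z => (y, z)) (fun a b hab => by simpa using hab)]
    congr 1
    apply List.filter_congr
    intro c hc
    rw [PySem.List.mem_dedup] at hc
    congr 1
    rw [decide_eq_decide]
    constructor
    · intro h3
      have : c.2 ∈ ys := snd_mem_combos2T ys c hc
      rw [List.mem_map]
      exact ⟨c.2, this, by rw [← h3]⟩
    · intro h3
      rw [List.mem_map] at h3
      obtain ⟨z, _, rfl⟩ := h3; rfl

theorem pvA3_eq (u : List Int) (hu : u.Pairwise (· ≤ ·)) :
    pvA3 u = PySem.List.dedup (combos3T u) := by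
  induction u with
  | nil => rfl
  | cons x xs ih =>
    have hxw : xs.Pairwise (· ≤ ·) := List.Pairwise.of_cons hu
    have hxlow : ∀ z ∈ xs, x ≤ z := (List.pairwise_cons.mp hu).1
    have hg : ∀ (a : Int) (r : List Int) (c : Int × Int × Int),
        c ∈ (fun x xs => (pvA2 xs).map (fun p => (x, p.1, p.2))) a r → (fun t => t.1) c = a := by
      intro a r c hc
      simp only [List.mem_map] at hc
      obtain ⟨p, _, rfl⟩ := hc; rfl
    have h1 : pvA3 (x :: xs)
        = (pvA2 xs).map (fun p => (x, p.1, p.2)) ++ sGo (fun x xs => (pvA2 xs).map (fun p => (x, p.1, p.2))) (some x) xs := by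
      simp [pvA3, sGo]
    rw [h1, sGo_some_eq_filter _ (fun t => t.1) hg xs x hxw hxlow]
    have h2 : sGo (fun x xs => (pvA2 xs).map (fun p => (x, p.1, p.2))) none xs = PySem.List.dedup (combos3T xs) := ih hxw
    rw [h2, pvA2_eq xs hxw]
    show _ = PySem.List.dedup ((combos2T xs).map (fun p => (x, p.1, p.2)) ++ combos3T xs)
    rw [dedup_append, dedup_map_inj (fun p : Int × Int => (x, p.1, p.2))
      (fun a b hab => by
        simp only [Prod.mk.injEq] at hab
        exact Prod.ext hab.2.1 hab.2.2)]
    congr 1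
    apply List.filter_congr
    intro c hc
    rw [PySem.List.mem_dedup] at hc
    congr 1
    rw [decide_eq_decide]
    constructor
    · intro h3
      have : (c.2.1, c.2.2) ∈ combos2T xs := tail_mem_combos3T xs c hc
      rw [List.mem_map]
      exact ⟨(c.2.1, c.2.2), this, by rw [← h3]⟩
    · intro h3
      rw [List.mem_map] at h3
      obtain ⟨p, _, rfl⟩ := h3; rfl

-- pulling A's prime test out as a filterMap
theorem lvl1 (x y : Int) (ys : List Int) :
    sGo (fun z _ => if is_prime (x + y + z) then [[x, y, z]] else []) none ys
      = (pvA1 ys).filterMap (fun z => pe3 (x, y, z)) := by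
  rw [pvA1, sGo_filterMap]
  apply sGo_congr
  intro z r
  by_cases h : is_prime (x + y + z) <;> simp [pe3, h]

theorem lvl2 (x : Int) (r : List Int) :
    g1A x r = (pvA2 r).filterMap (fun p => pe3 (x, p.1, p.2)) := by
  rw [pvA2, sGo_filterMap]
  unfold g1A
  apply sGo_congr
  intro y ys
  rw [List.filterMap_map, lvl1]
  rfl

theorem prime_extract (u : List Int) : sGo g1A none u = (pvA3 u).filterMap pe3 := by
  rw [pvA3, sGo_filterMap]
  apply sGo_congr
  intro x r
  rw [List.filterMap_map, lvl2]
  rfl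

-- A's index loops, turned into the structural skip recursion
theorem fold_skip {β : Type} (s : List Int) (g : Int → List Int → List β) (start : Int)
    (hs : 0 ≤ start) :
    ∀ (d : Nat) (m : Int), start ≤ m → m + d = s.length → ∀ (acc : List β),
      List.foldl (fun acc k =>
          if k > start ∧ PySem.List.pyGetD s k 0 = PySem.List.pyGetD s (k - 1) 0 then acc
          else acc ++ g (PySem.List.pyGetD s k 0) (s.drop (k + 1).toNat)) acc
        (PySem.List.pyRange m (PySem.List.len s))
      = acc ++ sGo g (if m = start then none else some (PySem.List.pyGetD s (m - 1) 0)) (s.drop m.toNat) := by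
  intro d
  induction d with
  | zero =>
    intro m hm hlen acc
    rw [PySem.List.pyRange_one_eq_nil (by simp only [PySem.List.len_eq]; omega)]
    have hd : s.drop m.toNat = [] := List.drop_eq_nil_of_le (by omega)
    rw [hd]
    simp [sGo]
  | succ d ih =>
    intro m hm hlen acc
    have h0m : 0 ≤ m := le_trans hs hm
    have hmlt : m < (s.length : Int) := by omega
    have hnat : m.toNat < s.length := by omega
    have hv : PySem.List.pyGetD s m 0 = s[m.toNat] := PySem.List.pyGetD_eq_getElem s 0 h0m hmlt
    have hdrop : s.drop m.toNat = s[m.toNat] :: s.drop (m.toNat + 1) := (List.getElem_cons_drop hnat).symm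
    have htn : (m + 1).toNat = m.toNat + 1 := by omega
    rw [PySem.List.pyRange_one_cons (by simp only [PySem.List.len_eq]; omega)]
    simp only [List.foldl_cons]
    by_cases hsk : m > start ∧ PySem.List.pyGetD s m 0 = PySem.List.pyGetD s (m - 1) 0
    · rw [if_pos hsk, ih (m + 1) (by omega) (by omega) acc,
        if_neg (show ¬ (m + 1 = start) by omega)]
      have h11 : m + 1 - 1 = m := by omega
      rw [h11, htn, hdrop,
        if_neg (show ¬ (m = start) by omega)]
      simp only [sGo]
      rw [if_pos (by rw [← hv, hsk.2]), List.nil_append, hv]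
    · rw [if_neg hsk, ih (m + 1) (by omega) (by omega) _,
        if_neg (show ¬ (m + 1 = start) by omega)]
      have h11 : m + 1 - 1 = m := by omega
      rw [h11, htn, hdrop]
      by_cases hms : m = start
      · rw [if_pos hms]
        simp only [sGo]
        rw [if_neg (show ¬ ((none : Option Int) = some s[m.toNat]) by simp),
          hv, List.append_assoc]
      · rw [if_neg hms]
        have hmgt : m > start := by omega
        have hneq : ¬ PySem.List.pyGetD s m 0 = PySem.List.pyGetD s (m - 1) 0 :=
          fun h => hsk ⟨hmgt, h⟩
        simp only [sGo]
        rw [if_neg (show ¬ (some (PySem.List.pyGetD s (m - 1) 0) = some s[m.toNat]) by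
          simp only [Option.some.injEq]
          rw [← hv]
          exact fun h => hneq h.symm),
          hv, List.append_assoc]

-- B's comprehension, turned into combos2T / combos3T
theorem bmid (s : List Int) (a : Int) :
    ∀ (d : Nat) (m : Int), 0 ≤ m → m + d = s.length →
      (PySem.List.pyRange m (PySem.List.len s)).flatMap (fun j =>
          (PySem.List.pyRange (j + 1) (PySem.List.len s)).map (fun k =>
            (a, PySem.List.pyGetD s j 0, PySem.List.pyGetD s k 0)))
        = (combos2T (s.drop m.toNat)).map (fun p => (a, p.1, p.2)) := by
  intro d
  induction d with
  | zero =>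
    intro m h0 hlen
    rw [PySem.List.pyRange_one_eq_nil (by simp only [PySem.List.len_eq]; omega)]
    have hd : s.drop m.toNat = [] := List.drop_eq_nil_of_le (by omega)
    rw [hd]
    simp [combos2T]
  | succ d ih =>
    intro m h0 hlen
    have hmlt : m < (s.length : Int) := by omega
    have hnat : m.toNat < s.length := by omega
    have hv : PySem.List.pyGetD s m 0 = s[m.toNat] := PySem.List.pyGetD_eq_getElem s 0 h0 hmlt
    have hdrop : s.drop m.toNat = s[m.toNat] :: s.drop (m.toNat + 1) := (List.getElem_cons_drop hnat).symm
    have htn : (m + 1).toNat = m.toNat + 1 := by omega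
    rw [PySem.List.pyRange_one_cons (by simp only [PySem.List.len_eq]; omega),
      List.flatMap_cons, hdrop]
    simp only [combos2T, List.map_append]
    congr 1
    · rw [List.map_map, ← htn,
        ← PySem.List.map_pyGetD_pyRange s 0 (show (0:Int) ≤ m + 1 by omega),
        List.map_map, hv]
      rfl
    · rw [ih (m + 1) (by omega) (by omega), htn]

theorem bout (s : List Int) :
    ∀ (d : Nat) (m : Int), 0 ≤ m → m + d = s.length →
      (PySem.List.pyRange m (PySem.List.len s)).flatMap (fun i =>
          (PySem.List.pyRange (i + 1) (PySem.List.len s)).flatMap (fun j =>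
            (PySem.List.pyRange (j + 1) (PySem.List.len s)).map (fun k =>
              (PySem.List.pyGetD s i 0, PySem.List.pyGetD s j 0, PySem.List.pyGetD s k 0))))
        = combos3T (s.drop m.toNat) := by
  intro d
  induction d with
  | zero =>
    intro m h0 hlen
    rw [PySem.List.pyRange_one_eq_nil (by simp only [PySem.List.len_eq]; omega)]
    have hd : s.drop m.toNat = [] := List.drop_eq_nil_of_le (by omega)
    rw [hd]
    rfl
  | succ d ih =>
    intro m h0 hlen
    have hmlt : m < (s.length : Int) := by omega
    have hnat : m.toNat < s.length := by omega
    have hv : PySem.List.pyGetD s m 0 = s[m.toNat] := PySem.List.pyGetD_eq_getElem s 0 h0 hmlt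
    have hdrop : s.drop m.toNat = s[m.toNat] :: s.drop (m.toNat + 1) := (List.getElem_cons_drop hnat).symm
    have htn : (m + 1).toNat = m.toNat + 1 := by omega
    rw [PySem.List.pyRange_one_cons (by simp only [PySem.List.len_eq]; omega),
      List.flatMap_cons, hdrop]
    simp only [combos3T]
    congr 1
    · rw [hv, bmid s (s[m.toNat]) d (m + 1) (by omega) (by omega), htn]
    · rw [ih (m + 1) (by omega) (by omega), htn]

-- A's whole nested fold equals the structural skip recursion
theorem foldl_drop_last {α β : Type} (f : β → α → β) (init : β) (l : List α) (x : α)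
    (hx : ∀ b, f b x = b) : List.foldl f init (l ++ [x]) = List.foldl f init l := by
  rw [List.foldl_append]
  simp [hx]

theorem g1A_short (x : Int) (r : List Int) (hr : r.length ≤ 1) : g1A x r = [] := by
  match r with
  | [] => rfl
  | [y] => simp [g1A, sGo]
  | y :: z :: t => simp at hr

theorem inner_eq (s : List Int) (a b : Int) (j : Int) (h0 : 0 ≤ j) (hj : j < (s.length : Int))
    (acc : List (List Int)) :
    List.foldl (fun acc3 k =>
        if k > j + 1 ∧ PySem.List.pyGetD s k 0 = PySem.List.pyGetD s (k - 1) 0 then acc3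
        else if is_prime (a + b + PySem.List.pyGetD s k 0) then
          acc3 ++ [[a, b, PySem.List.pyGetD s k 0]] else acc3) acc
      (PySem.List.pyRange (j + 1) ((s.length : Int)))
    = acc ++ sGo (fun z _ => if is_prime (a + b + z) then [[a, b, z]] else []) none (s.drop (j + 1).toNat) := by
  rw [PySem.List.foldl_congr_mem _ _ (fun acc3 k =>
      if k > j + 1 ∧ PySem.List.pyGetD s k 0 = PySem.List.pyGetD s (k - 1) 0 then acc3
      else acc3 ++ (if is_prime (a + b + PySem.List.pyGetD s k 0) then [[a, b, PySem.List.pyGetD s k 0]] else [])) acc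
      (by
        intro acc3 k _
        beta_reduce
        by_cases hsk : k > j + 1 ∧ PySem.List.pyGetD s k 0 = PySem.List.pyGetD s (k - 1) 0
        · rw [if_pos hsk, if_pos hsk]
        · rw [if_neg hsk, if_neg hsk]
          by_cases hp : is_prime (a + b + PySem.List.pyGetD s k 0) <;> simp [hp])]
  have hfin := fold_skip s (fun z _ => if is_prime (a + b + z) then [[a, b, z]] else []) (j + 1)
    (by omega) (s.length - (j + 1).toNat) (j + 1) le_rfl (by omega) acc
  rw [if_pos rfl] at hfin
  exact hfin

theorem mid_eq (s : List Int) (i : Int) (h0 : 0 ≤ i) (hi : i < (s.length : Int))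
    (acc : List (List Int)) :
    List.foldl (fun acc2 j =>
        if j > i + 1 ∧ PySem.List.pyGetD s j 0 = PySem.List.pyGetD s (j - 1) 0 then acc2
        else
          List.foldl (fun acc3 k =>
            if k > j + 1 ∧ PySem.List.pyGetD s k 0 = PySem.List.pyGetD s (k - 1) 0 then acc3
            else if is_prime (PySem.List.pyGetD s i 0 + PySem.List.pyGetD s j 0 + PySem.List.pyGetD s k 0) then
              acc3 ++ [[PySem.List.pyGetD s i 0, PySem.List.pyGetD s j 0, PySem.List.pyGetD s k 0]]
            else acc3) acc2 (PySem.List.pyRange (j + 1) ((s.length : Int)))) acc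
      (PySem.List.pyRange (i + 1) ((s.length : Int) - 1))
    = acc ++ g1A (PySem.List.pyGetD s i 0) (s.drop (i + 1).toNat) := by
  by_cases hc : i + 1 ≤ (s.length : Int) - 1
  · rw [PySem.List.foldl_congr_mem _ _ (fun acc2 j =>
        if j > i + 1 ∧ PySem.List.pyGetD s j 0 = PySem.List.pyGetD s (j - 1) 0 then acc2
        else acc2 ++ sGo (fun z (_ : List Int) =>
            if is_prime (PySem.List.pyGetD s i 0 + PySem.List.pyGetD s j 0 + z) then
              [[PySem.List.pyGetD s i 0, PySem.List.pyGetD s j 0, z]] else []) none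
          (s.drop (j + 1).toNat)) acc
        (by
          intro acc2 j hj
          beta_reduce
          rw [PySem.List.mem_pyRange_one] at hj
          by_cases hsk : j > i + 1 ∧ PySem.List.pyGetD s j 0 = PySem.List.pyGetD s (j - 1) 0
          · rw [if_pos hsk, if_pos hsk]
          · rw [if_neg hsk, if_neg hsk]
            exact inner_eq s (PySem.List.pyGetD s i 0) (PySem.List.pyGetD s j 0) j (by omega) (by omega) acc2)]
    have hsplitm : PySem.List.pyRange (i + 1) ((s.length : Int))
        = PySem.List.pyRange (i + 1) ((s.length : Int) - 1) ++ [(s.length : Int) - 1] := by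
      have h := PySem.List.pyRange_one_succ_right (a := i + 1) (b := (s.length : Int) - 1) (by omega)
      have h1 : ((s.length : Int) - 1) + 1 = ((s.length : Int)) := by omega
      rw [h1] at h
      exact h
    rw [← foldl_drop_last _ acc (PySem.List.pyRange (i + 1) ((s.length : Int) - 1)) ((s.length : Int) - 1)
      (by
        intro b2
        have hdnil : s.drop (((s.length : Int) - 1) + 1).toNat = [] := List.drop_eq_nil_of_le (by omega)
        by_cases hsk : ((s.length : Int) - 1) > i + 1 ∧ PySem.List.pyGetD s ((s.length : Int) - 1) 0 = PySem.List.pyGetD s (((s.length : Int) - 1) - 1) 0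
        · rw [if_pos hsk]
        · rw [if_neg hsk, hdnil]
          simp [sGo])]
    rw [← hsplitm]
    have hfin := fold_skip s (fun y r => sGo (fun z (_ : List Int) =>
        if is_prime (PySem.List.pyGetD s i 0 + y + z) then
          [[PySem.List.pyGetD s i 0, y, z]] else []) none r) (i + 1)
      (by omega) (s.length - (i + 1).toNat) (i + 1) le_rfl (by omega) acc
    rw [if_pos rfl] at hfin
    exact hfin
  · rw [PySem.List.pyRange_one_eq_nil (by omega), List.foldl_nil]
    have hdnil : s.drop (i + 1).toNat = [] := List.drop_eq_nil_of_le (by omega)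
    rw [hdnil, g1A_short _ _ (by simp), List.append_nil]

theorem a_fold_eq (s : List Int) (h3 : 3 ≤ (s.length : Int)) :
    (PySem.List.pyRange 0 ((s.length : Int) - 2)).foldl (fun acc1 i =>
      if i > 0 ∧ PySem.List.pyGetD s i 0 = PySem.List.pyGetD s (i - 1) 0 then acc1
      else
        (PySem.List.pyRange (i + 1) ((s.length : Int) - 1)).foldl (fun acc2 j =>
          if j > i + 1 ∧ PySem.List.pyGetD s j 0 = PySem.List.pyGetD s (j - 1) 0 then acc2
          else
            (PySem.List.pyRange (j + 1) (s.length : Int)).foldl (fun acc3 k =>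
              if k > j + 1 ∧ PySem.List.pyGetD s k 0 = PySem.List.pyGetD s (k - 1) 0 then acc3
              else
                if is_prime (PySem.List.pyGetD s i 0 + PySem.List.pyGetD s j 0 + PySem.List.pyGetD s k 0) then
                  acc3 ++ [[PySem.List.pyGetD s i 0, PySem.List.pyGetD s j 0, PySem.List.pyGetD s k 0]]
                else acc3) acc2) acc1) []
    = sGo g1A none s := by
  rw [PySem.List.foldl_congr_mem _ _ (fun acc1 i =>
      if i > 0 ∧ PySem.List.pyGetD s i 0 = PySem.List.pyGetD s (i - 1) 0 then acc1
      else acc1 ++ g1A (PySem.List.pyGetD s i 0) (s.drop (i + 1).toNat)) []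
      (by
        intro acc1 i hi
        beta_reduce
        rw [PySem.List.mem_pyRange_one] at hi
        by_cases hsk : i > 0 ∧ PySem.List.pyGetD s i 0 = PySem.List.pyGetD s (i - 1) 0
        · rw [if_pos hsk, if_pos hsk]
        · rw [if_neg hsk, if_neg hsk]
          exact mid_eq s i (by omega) (by omega) acc1)]
  have hid : ∀ (b : List (List Int)) (i : Int), (s.length : Int) - 2 ≤ i →
      (if i > 0 ∧ PySem.List.pyGetD s i 0 = PySem.List.pyGetD s (i - 1) 0 then b
       else b ++ g1A (PySem.List.pyGetD s i 0) (s.drop (i + 1).toNat)) = b := by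
    intro b i hile
    have hshort : (s.drop (i + 1).toNat).length ≤ 1 := by
      rw [List.length_drop]; omega
    rw [g1A_short _ _ hshort]
    by_cases hsk : i > 0 ∧ PySem.List.pyGetD s i 0 = PySem.List.pyGetD s (i - 1) 0
    · rw [if_pos hsk]
    · rw [if_neg hsk, List.append_nil]
  have hsplit2 : PySem.List.pyRange 0 ((s.length : Int) - 1)
      = PySem.List.pyRange 0 ((s.length : Int) - 2) ++ [(s.length : Int) - 2] := by
    have h := PySem.List.pyRange_one_succ_right (a := 0) (b := (s.length : Int) - 2) (by omega)
    have h1 : ((s.length : Int) - 2) + 1 = ((s.length : Int) - 1) := by omega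
    rw [h1] at h
    exact h
  have hsplit1 : PySem.List.pyRange 0 ((s.length : Int))
      = PySem.List.pyRange 0 ((s.length : Int) - 1) ++ [(s.length : Int) - 1] := by
    have h := PySem.List.pyRange_one_succ_right (a := 0) (b := (s.length : Int) - 1) (by omega)
    have h1 : ((s.length : Int) - 1) + 1 = ((s.length : Int)) := by omega
    rw [h1] at h
    exact h
  rw [← foldl_drop_last _ [] (PySem.List.pyRange 0 ((s.length : Int) - 2)) ((s.length : Int) - 2)
    (fun b => hid b _ (by omega))]
  rw [← hsplit2]
  rw [← foldl_drop_last _ [] (PySem.List.pyRange 0 ((s.length : Int) - 1)) ((s.length : Int) - 1)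
    (fun b => hid b _ (by omega))]
  rw [← hsplit1]
  have hfin := fold_skip s g1A 0 le_rfl s.length 0 le_rfl (by omega) ([] : List (List Int))
  rw [if_pos rfl] at hfin
  simpa using hfin

-- ===== VERDICT (by name: the statement is the Claim_ definition above) =====
theorem find_valid_triplets_for_country_spec : Claim_equal_find_valid_triplets_for_country := by
  intro nums _
  show find_valid_triplets_for_country nums = find_valid_triplets_for_country_alt nums
  simp only [find_valid_triplets_for_country, find_valid_triplets_for_country_alt]
  by_cases h3 : PySem.List.len nums < 3
  · rw [if_pos h3, if_pos h3]
  · rw [if_neg h3, if_neg h3]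
    have hlen : PySem.List.len nums = ((PySem.List.sorted nums (fun x => x) false).length : Int) := by
      simp [PySem.List.len_eq, PySem.List.length_sorted]
    have h3' : 3 ≤ ((PySem.List.sorted nums (fun x => x) false).length : Int) := by
      have h4 := h3
      rw [hlen] at h4
      omega
    have hpw : (PySem.List.sorted nums (fun x => x) false).Pairwise (· ≤ ·) := by
      have := PySem.List.sorted_pairwise nums (fun x => x)
      simpa using this
    rw [hlen]
    refine Eq.trans (a_fold_eq _ h3') ?_
    rw [prime_extract, pvA3_eq _ hpw]
    rw [bout (PySem.List.sorted nums (fun x => x) false)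
      (PySem.List.sorted nums (fun x => x) false).length 0 le_rfl (by omega)]
    rfl
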